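-- pv_equiv track=rewrite | github.com/sowmya-sree-builds/Full-stack-Python-Portfolio | Backend/Python/L2_PS/L2_Matrixes.py | upper_triangle
-- ===== SOURCE A (Python) =====
-- def upper_triangle(mat):
--     n = len(mat)
--     res = [[0]*n for _ in range(n)]
--     for i in range(n):
--         for j in range(n):
--             if i <= j:
--                 res[i][j] = mat[i][j]
--     return res
-- ===== SOURCE B (Python) =====
-- def upper_triangle(mat):
--     n = len(mat)
--     return [[0] * i + list(row[i:n]) for i, row in enumerate(mat)]
-- ===== Notes on version B (the rewrite author's own statement) =====
-- stated objective: simpler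
-- what changed: Builds the result row-by-row as a zero prefix concatenated with the upper slice of each source row, instead of allocating an n x n zero matrix and overwriting cells in a nested loop with an i<=j branch.
import Mathlib
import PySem

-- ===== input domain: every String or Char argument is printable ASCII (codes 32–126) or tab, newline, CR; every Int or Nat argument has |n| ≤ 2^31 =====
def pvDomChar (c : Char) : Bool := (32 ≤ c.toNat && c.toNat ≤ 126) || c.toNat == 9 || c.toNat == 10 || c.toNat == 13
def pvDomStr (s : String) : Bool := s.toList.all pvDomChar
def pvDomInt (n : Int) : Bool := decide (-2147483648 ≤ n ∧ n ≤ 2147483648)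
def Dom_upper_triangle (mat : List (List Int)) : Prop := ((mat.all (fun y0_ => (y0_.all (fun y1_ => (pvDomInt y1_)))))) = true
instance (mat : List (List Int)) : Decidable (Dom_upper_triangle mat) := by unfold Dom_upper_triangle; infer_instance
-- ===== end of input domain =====

-- B builds each row as a zero prefix ++ the upper slice of the source row (simpler, no cell-by-cell mutation);
-- equivalence is about return values (A mutates only its fresh local list, so side effects are not observable).

-- ===== PORT A =====
-- `[0]*n` / `[[0]*n for _ in range(n)]`: n = len(mat) ≥ 0, so List.replicate n.toNat is exact;
-- all indices come from range(n) and Pre_ keeps every access in range, so the total forms pyGetD/pySetD are exact.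
def upper_triangle (mat : List (List Int)) : List (List Int) :=
  let n : Int := PySem.List.len mat
  let res := (PySem.List.pyRange 0 n 1).map (fun _ => List.replicate n.toNat (0 : Int))
  (PySem.List.pyRange 0 n 1).foldl (fun res i =>
    (PySem.List.pyRange 0 n 1).foldl (fun res j =>
      if i ≤ j then
        PySem.List.pySetD res i
          (PySem.List.pySetD (PySem.List.pyGetD res i [])
            j (PySem.List.pyGetD (PySem.List.pyGetD mat i []) j 0))
      else res) res) res

-- ===== PORT B =====
-- `[[0]*i + list(row[i:n]) for i, row in enumerate(mat)]`; i ≥ 0 from enumerate, so replicate i.toNat is exact.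
def upper_triangle_alt (mat : List (List Int)) : List (List Int) :=
  let n : Int := PySem.List.len mat
  (PySem.List.enumerate mat).map (fun p =>
    List.replicate p.1.toNat (0 : Int) ++ PySem.List.slice p.2 (some p.1) (some n))

-- ===== PRECONDITION & SPEC =====
-- Pre_ excludes exactly the inputs where A raises IndexError: a row shorter than len(mat).
def Pre_upper_triangle (mat : List (List Int)) : Prop := ∀ row ∈ mat, mat.length ≤ row.length
instance (mat : List (List Int)) : Decidable (Pre_upper_triangle mat) := by
  unfold Pre_upper_triangle; infer_instance
def pvWitness_upper_triangle : List (List Int) := [[1, 2], [3, 4]]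

def Spec_upper_triangle (mat : List (List Int)) (out : List (List Int)) : Prop :=
  out = upper_triangle_alt mat
instance (mat : List (List Int)) (out : List (List Int)) : Decidable (Spec_upper_triangle mat out) := by
  unfold Spec_upper_triangle; infer_instance

-- ===== CLAIM =====
def Claim_equal_upper_triangle : Prop :=
  ∀ (mat : List (List Int)), Dom_upper_triangle mat → Pre_upper_triangle mat →
    Spec_upper_triangle mat (upper_triangle mat)

-- ===== LEMMAS AND PROOFS =====

-- a fold whose step never changes the state is the identity
theorem pv_foldl_noop {α β : Type} (l : List β) (w : α) (f : α → β → α)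
    (h : ∀ (a : α) (b : β), b ∈ l → f a b = a) : l.foldl f w = w := by
  induction l generalizing w with
  | nil => rfl
  | cons b l ih =>
      simp only [List.foldl_cons, h w b (by simp)]
      exact ih w (fun a b' hb' => h a b' (by simp [hb']))

-- the inner j-loop only rewrites row i: hoist it to a single set of row i
theorem pv_hoist (mat : List (List Int)) (i : Nat) (l : List Nat) :
    ∀ (r : List (List Int)), i < r.length →
    l.foldl (fun r j => if i ≤ j then
        r.set i ((r.getD i []).set j ((mat.getD i []).getD j 0)) else r) r
    = r.set i (l.foldl (fun w j => if i ≤ j then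
        w.set j ((mat.getD i []).getD j 0) else w) (r.getD i [])) := by
  induction l with
  | nil =>
      intro r hr
      rw [List.getD_eq_getElem r [] hr]
      exact (List.set_getElem_self hr).symm
  | cons j l ih =>
      intro r hr
      by_cases hij : i ≤ j
      · simp only [List.foldl_cons, if_pos hij]
        have hr' : i < (r.set i ((r.getD i []).set j ((mat.getD i []).getD j 0))).length := by
          simpa using hr
        rw [ih _ hr', List.set_set]
        congr 1
        rw [List.getD_eq_getElem _ [] hr']
        simp
      · simp only [List.foldl_cons, if_neg hij]
        exact ih r hr

-- the state of the j-loop on row i after the first i+k steps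
theorem pv_inner_aux (row : List Int) (i n : Nat) (hrow : n ≤ row.length) :
    ∀ (k : Nat), i + k ≤ n →
    (List.range (i + k)).foldl (fun w j => if i ≤ j then
        w.set j (row.getD j 0) else w) (List.replicate n (0 : Int))
    = List.replicate i 0 ++ (row.drop i).take k ++ List.replicate (n - (i + k)) 0 := by
  intro k
  induction k with
  | zero =>
      intro _
      rw [pv_foldl_noop]
      · rw [List.take_zero, List.append_nil, ← List.replicate_add]
        congr 1; omega
      · intro w j hj
        rw [if_neg]
        simp only [List.mem_range] at hj
        omega
  | succ k ih =>
      intro hk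
      have hik : i + k < n := by omega
      have hT : ((row.drop i).take k).length = k := by
        rw [List.length_take, List.length_drop]; omega
      rw [show i + (k + 1) = (i + k) + 1 by omega, List.range_succ, List.foldl_append,
        ih (by omega)]
      simp only [List.foldl_cons, List.foldl_nil, if_pos (by omega : i ≤ i + k)]
      rw [List.set_append_right _ _
        (by simp [hT] : (List.replicate i (0:Int) ++ (row.drop i).take k).length ≤ i + k)]
      have hlen : (List.replicate i (0:Int) ++ (row.drop i).take k).length = i + k := by
        simp [hT]
      rw [hlen]
      have hrep : List.replicate (n - (i + k)) (0 : Int)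
          = 0 :: List.replicate (n - (i + k + 1)) 0 := by
        rw [show n - (i + k) = (n - (i + k + 1)) + 1 by omega, List.replicate_succ]
      rw [hrep]
      simp only [Nat.sub_self, List.set_cons_zero]
      rw [List.take_add_one, List.getElem?_drop,
        (row.getElem?_eq_getElem (by omega : i + k < row.length)),
        List.getD_eq_getElem row 0 (by omega : i + k < row.length)]
      simp

-- the finished row i equals B's zero prefix ++ upper slice
theorem pv_inner_fold (row : List Int) (i n : Nat) (hin : i < n) (hrow : n ≤ row.length) :
    (List.range n).foldl (fun w j => if i ≤ j then
        w.set j (row.getD j 0) else w) (List.replicate n (0 : Int))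
    = List.replicate i 0 ++ (row.drop i).take (n - i) := by
  have h := pv_inner_aux row i n hrow (n - i) (by omega)
  rw [show i + (n - i) = n by omega] at h
  rw [h]
  simp

-- the outer i-loop builds the rows independently, left to right
theorem pv_outer (mat : List (List Int)) (n : Nat) :
    ∀ (m : Nat) (r : List (List Int)), m ≤ r.length →
    (List.range m).foldl (fun r i =>
      (List.range n).foldl (fun r j => if i ≤ j then
        r.set i ((r.getD i []).set j ((mat.getD i []).getD j 0)) else r) r) r
    = (List.range m).map (fun i => (List.range n).foldl (fun w j => if i ≤ j then
        w.set j ((mat.getD i []).getD j 0) else w) (r.getD i [])) ++ r.drop m := by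
  intro m
  induction m with
  | zero => intro r _; simp
  | succ m ih =>
      intro r hm
      have hmr : m < r.length := by omega
      rw [List.range_succ, List.foldl_append, ih r (by omega)]
      simp only [List.foldl_cons, List.foldl_nil]
      have hM : ((List.range m).map (fun i => (List.range n).foldl (fun w j => if i ≤ j then
          w.set j ((mat.getD i []).getD j 0) else w) (r.getD i []))).length = m := by
        simp
      have hgd : ((List.range m).map (fun i => (List.range n).foldl (fun w j => if i ≤ j then
          w.set j ((mat.getD i []).getD j 0) else w) (r.getD i [])) ++ r.drop m).getD m []
          = r.getD m [] := by
        rw [List.getD_eq_getElem?_getD, List.getElem?_append_right (by omega), hM,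
          Nat.sub_self, List.getElem?_drop, Nat.add_zero, ← List.getD_eq_getElem?_getD]
      rw [pv_hoist mat m _ _ (by simp; omega), hgd,
        List.set_append_right _ _ (by omega : _ ≤ m), hM, Nat.sub_self,
        List.drop_eq_getElem_cons hmr, List.set_cons_zero, List.map_append]
      simp

-- B's port, in closed form over List.range
theorem pv_alt_eq (mat : List (List Int)) :
    upper_triangle_alt mat
    = (List.range mat.length).map (fun i =>
        List.replicate i 0 ++ ((mat.getD i []).drop i).take (mat.length - i)) := by
  unfold upper_triangle_alt
  rw [PySem.List.enumerate_eq_map_pyRange mat ([] : List Int)]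
  simp only [PySem.List.len_eq, PySem.List.pyRange_zero_nat, List.map_map]
  refine List.map_congr_left (fun k _ => ?_)
  simp only [Function.comp, PySem.List.pyGetD_natCast, Int.toNat_natCast,
    PySem.List.slice_natCast]

theorem upper_triangle_spec : Claim_equal_upper_triangle := by
  intro mat _ hpre
  unfold Spec_upper_triangle upper_triangle
  simp only [PySem.List.len_eq, PySem.List.pyRange_zero_nat, List.foldl_map, List.map_map,
    PySem.List.pySetD_natCast, PySem.List.pyGetD_natCast, Nat.cast_le, Int.toNat_natCast,
    Function.comp_def]
  have hrep : (List.range mat.length).map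
      (fun _ : Nat => List.replicate mat.length (0 : Int))
      = List.replicate mat.length (List.replicate mat.length (0 : Int)) := by
    rw [List.map_const', List.length_range]
  rw [hrep, pv_outer mat mat.length mat.length _ (by simp), pv_alt_eq]
  rw [List.drop_replicate, Nat.sub_self, List.replicate_zero, List.append_nil]
  refine List.map_congr_left (fun i hi => ?_)
  simp only [List.mem_range] at hi
  have hz : (List.replicate mat.length (List.replicate mat.length (0 : Int))).getD i []
      = List.replicate mat.length 0 := by
    rw [List.getD_eq_getElem _ [] (by simpa using hi), List.getElem_replicate]
  rw [hz, pv_inner_fold (mat.getD i []) i mat.length hi]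
  · rw [List.getD_eq_getElem mat [] hi]
    exact hpre _ (List.getElem_mem hi)
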